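-- pv_equiv track=rewrite | github.com/hamzayogurtcuoglu/CSE321-Algorithm-Design-and-Analyzes | Hw3/question5.py | recursiveExhaustiveSearchAlgorithm
-- ===== SOURCE A (Python) =====
-- def recursiveExhaustiveSearchAlgorithm(A,rightSide,index,subarr):
--
--     optimalSubArray ,optimalSubArray2= [] , []
--
--     if index == len(A):
--         if len(subarr) != 0:
--             return subarr
--     else:
--         optimalSubArray = recursiveExhaustiveSearchAlgorithm(A,rightSide ,index + 1, subarr)
--         optimalSubArray2 = recursiveExhaustiveSearchAlgorithm(A,rightSide, index + 1, subarr + [A[index]])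
--     return findOptimal(optimalSubArray,optimalSubArray2,rightSide)
--
-- def findOptimal(optimalSubArray,optimalSubArray2,rightSide):
--     if len(optimalSubArray) == 0 and len(optimalSubArray2) == 0:
--         return []
--     elif len(optimalSubArray) != 0 and len(optimalSubArray2) == 0:
--         if sumOfArray(optimalSubArray) >= rightSide:
--             return optimalSubArray
--         else:
--             return []
--     elif len(optimalSubArray) == 0 and len(optimalSubArray2) != 0:
--         if sumOfArray(optimalSubArray2) >= rightSide:
--             return optimalSubArray2
--         else:
--             return []
--     else:
--         if sumOfArray(optimalSubArray2) >= rightSide and sumOfArray(optimalSubArray) >= rightSide: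
--             multi1 = multiplicationOfItems(optimalSubArray)
--             multi2 = multiplicationOfItems(optimalSubArray2)
--             return optimalSubArray if multi1<multi2 else optimalSubArray2
--         elif sumOfArray(optimalSubArray2) >= rightSide and sumOfArray(optimalSubArray) < rightSide:
--             return optimalSubArray2
--         elif sumOfArray(optimalSubArray2) < rightSide and sumOfArray(optimalSubArray) >= rightSide:
--             return optimalSubArray
--         else:
--             return []
--
-- def multiplicationOfItems(array):
--     multiplication = 1
--     for i in range(len(array)):
--         multiplication = multiplication*array[i]
--     return multiplication
--
-- def sumOfArray(array):
--     sum = 0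
--     for i in range(len(array)):
--         sum = sum + array[i]
--     return sum
-- ===== SOURCE B (Python) =====
-- def _prod(xs):
--     p = 1
--     for v in xs:
--         p = p * v
--     return p
--
-- def recursiveExhaustiveSearchAlgorithm(A, rightSide, index, subarr):
--     # Iterative exhaustive search: enumerate every subset of the remaining
--     # elements (earliest position most significant, exclude-before-include),
--     # keep candidates with sum >= rightSide, pick the minimal product,
--     # resolving ties in favour of the later (include-preferring) candidate.
--     elems = [A[j] for j in range(index, len(A))]
--     sets = [[]]
--     for x in reversed(elems):
--         sets = sets + [[x] + s for s in sets]
--     best = None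
--     for s in sets:
--         cand = subarr + s
--         if cand and sum(cand) >= rightSide:
--             if best is None or _prod(cand) <= _prod(best):
--                 best = cand
--     return best if best is not None else []
-- ===== Notes on version B (the rewrite author's own statement) =====
-- stated objective: alternative
-- what changed: Replaces A's double recursion with pairwise findOptimal tournaments by an iterative enumeration of all subsets of the remaining elements followed by a single best-candidate fold (min product among sum>=threshold candidates, later candidate wins ties).
-- intended difference: When called with index == len(A) and a nonempty subarr whose sum is below rightSide, A returns subarr without the threshold check it applies everywhere else, while B returns []; B's value is intended since such a subarr fails the sum >= rightSide requirement. — e.g. on recursiveExhaustiveSearchAlgorithm([], 5, 0, [1]): A returns [1], B returns []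
import Mathlib
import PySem

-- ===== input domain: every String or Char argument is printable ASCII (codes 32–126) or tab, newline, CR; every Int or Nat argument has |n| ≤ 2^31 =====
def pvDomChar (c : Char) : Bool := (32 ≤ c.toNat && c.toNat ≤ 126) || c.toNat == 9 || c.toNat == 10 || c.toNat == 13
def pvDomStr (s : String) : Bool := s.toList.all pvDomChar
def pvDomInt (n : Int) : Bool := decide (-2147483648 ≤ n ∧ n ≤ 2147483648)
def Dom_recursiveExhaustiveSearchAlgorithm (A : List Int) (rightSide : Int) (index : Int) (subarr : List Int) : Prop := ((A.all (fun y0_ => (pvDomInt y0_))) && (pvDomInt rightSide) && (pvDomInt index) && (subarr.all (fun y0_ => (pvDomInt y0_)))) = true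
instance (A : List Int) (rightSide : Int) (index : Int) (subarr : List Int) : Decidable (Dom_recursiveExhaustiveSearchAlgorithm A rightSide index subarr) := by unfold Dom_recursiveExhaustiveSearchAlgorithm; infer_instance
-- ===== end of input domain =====

-- B replaces A's double recursion by an iterative subset enumeration with a single best-candidate fold (objective: alternative decomposition; equal except where D_ states A skips the threshold check).

-- ===== PORT A =====
def sumOfArray (array : List Int) : Int := array.foldl (fun s x => s + x) 0

def multiplicationOfItems (array : List Int) : Int := array.foldl (fun m x => m * x) 1

def findOptimal (optimalSubArray optimalSubArray2 : List Int) (rightSide : Int) : List Int :=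
  if optimalSubArray.length = 0 ∧ optimalSubArray2.length = 0 then []
  else if optimalSubArray.length ≠ 0 ∧ optimalSubArray2.length = 0 then
    (if sumOfArray optimalSubArray ≥ rightSide then optimalSubArray else [])
  else if optimalSubArray.length = 0 ∧ optimalSubArray2.length ≠ 0 then
    (if sumOfArray optimalSubArray2 ≥ rightSide then optimalSubArray2 else [])
  else
    if sumOfArray optimalSubArray2 ≥ rightSide ∧ sumOfArray optimalSubArray ≥ rightSide then
      (if multiplicationOfItems optimalSubArray < multiplicationOfItems optimalSubArray2 then
        optimalSubArray else optimalSubArray2)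
    else if sumOfArray optimalSubArray2 ≥ rightSide ∧ sumOfArray optimalSubArray < rightSide then
      optimalSubArray2
    else if sumOfArray optimalSubArray2 < rightSide ∧ sumOfArray optimalSubArray ≥ rightSide then
      optimalSubArray
    else []

-- A's recursion, with fuel = number of remaining indices (Python diverges/raises when
-- index is outside [-len(A), len(A)]; those inputs are excluded by Pre_ below).
def pvGoA (A : List Int) (rightSide : Int) (fuel : Nat) (index : Int) (subarr : List Int) : List Int :=
  if index = (A.length : Int) then
    (if subarr.length ≠ 0 then subarr else findOptimal [] [] rightSide)
  else
    match fuel with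
    | 0 => []
    | Nat.succ f =>
        findOptimal (pvGoA A rightSide f (index + 1) subarr)
          (pvGoA A rightSide f (index + 1) (subarr ++ [(PySem.List.pyGet? A index).getD 0])) rightSide

def recursiveExhaustiveSearchAlgorithm (A : List Int) (rightSide : Int) (index : Int) (subarr : List Int) : List Int :=
  pvGoA A rightSide ((A.length : Int) - index).toNat index subarr

-- ===== PORT B =====
def pvProdB (xs : List Int) : Int := xs.foldl (fun p v => p * v) 1

-- one step of B's best-candidate update (the body of B's `for s in sets` loop)
def pvUpd (rightSide : Int) (best : Option (List Int)) (cand : List Int) : Option (List Int) :=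
  if cand ≠ [] ∧ cand.sum ≥ rightSide then
    match best with
    | none => some cand
    | some b => if pvProdB cand ≤ pvProdB b then some cand else some b
  else best

def recursiveExhaustiveSearchAlgorithm_alt (A : List Int) (rightSide : Int) (index : Int) (subarr : List Int) : List Int :=
  let elems := (PySem.List.pyRange index (A.length : Int) 1).map (fun j => (PySem.List.pyGet? A j).getD 0)
  let sets := elems.reverse.foldl (fun acc x => acc ++ acc.map (fun s => x :: s)) [([] : List Int)]
  let best := sets.foldl (fun best s => pvUpd rightSide best (subarr ++ s)) none
  best.getD []

-- ===== PRECONDITION & SPEC =====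
-- Pre_ excludes exactly the inputs where Python A raises: index > len(A) (unbounded
-- recursion) or index < -len(A) (IndexError).
def Pre_recursiveExhaustiveSearchAlgorithm (A : List Int) (rightSide : Int) (index : Int) (subarr : List Int) : Prop :=
  -(A.length : Int) ≤ index ∧ index ≤ (A.length : Int)

instance (A : List Int) (rightSide : Int) (index : Int) (subarr : List Int) : Decidable (Pre_recursiveExhaustiveSearchAlgorithm A rightSide index subarr) := by unfold Pre_recursiveExhaustiveSearchAlgorithm; infer_instance

def pvWitness_recursiveExhaustiveSearchAlgorithm : List Int × Int × Int × List Int := ([1, 2], 2, 0, [])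

-- When called with index = len(A) and a nonempty subarr whose sum is below rightSide,
-- A returns subarr without the threshold check it applies everywhere else, while B
-- returns []; B's value is the intended one since such a subarr does not satisfy sum ≥ rightSide.
def D_recursiveExhaustiveSearchAlgorithm (A : List Int) (rightSide : Int) (index : Int) (subarr : List Int) : Prop :=
  index = (A.length : Int) ∧ subarr ≠ [] ∧ subarr.sum < rightSide

instance (A : List Int) (rightSide : Int) (index : Int) (subarr : List Int) : Decidable (D_recursiveExhaustiveSearchAlgorithm A rightSide index subarr) := by unfold D_recursiveExhaustiveSearchAlgorithm; infer_instance

def Spec_recursiveExhaustiveSearchAlgorithm (A : List Int) (rightSide : Int) (index : Int) (subarr : List Int) (out : List Int) : Prop := ¬ D_recursiveExhaustiveSearchAlgorithm A rightSide index subarr → out = recursiveExhaustiveSearchAlgorithm_alt A rightSide index subarr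

instance (A : List Int) (rightSide : Int) (index : Int) (subarr : List Int) (out : List Int) : Decidable (Spec_recursiveExhaustiveSearchAlgorithm A rightSide index subarr out) := by unfold Spec_recursiveExhaustiveSearchAlgorithm; infer_instance

def pvDiffWitness_recursiveExhaustiveSearchAlgorithm : List Int × Int × Int × List Int := ([], 5, 0, [1])

def pvDiffWitnessOut_recursiveExhaustiveSearchAlgorithm : (List Int) × (List Int) := ([1], [])

-- ===== CLAIM (what is proved, stated in full; the proofs are below) =====
def Claim_unchanged_recursiveExhaustiveSearchAlgorithm : Prop := ∀ (A : List Int) (rightSide : Int) (index : Int) (subarr : List Int), Dom_recursiveExhaustiveSearchAlgorithm A rightSide index subarr → Pre_recursiveExhaustiveSearchAlgorithm A rightSide index subarr → Spec_recursiveExhaustiveSearchAlgorithm A rightSide index subarr (recursiveExhaustiveSearchAlgorithm A rightSide index subarr)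
def Claim_changed_recursiveExhaustiveSearchAlgorithm : Prop := Dom_recursiveExhaustiveSearchAlgorithm (pvDiffWitness_recursiveExhaustiveSearchAlgorithm.1) (pvDiffWitness_recursiveExhaustiveSearchAlgorithm.2.1) (pvDiffWitness_recursiveExhaustiveSearchAlgorithm.2.2.1) (pvDiffWitness_recursiveExhaustiveSearchAlgorithm.2.2.2) ∧ Pre_recursiveExhaustiveSearchAlgorithm (pvDiffWitness_recursiveExhaustiveSearchAlgorithm.1) (pvDiffWitness_recursiveExhaustiveSearchAlgorithm.2.1) (pvDiffWitness_recursiveExhaustiveSearchAlgorithm.2.2.1) (pvDiffWitness_recursiveExhaustiveSearchAlgorithm.2.2.2) ∧ D_recursiveExhaustiveSearchAlgorithm (pvDiffWitness_recursiveExhaustiveSearchAlgorithm.1) (pvDiffWitness_recursiveExhaustiveSearchAlgorithm.2.1) (pvDiffWitness_recursiveExhaustiveSearchAlgorithm.2.2.1) (pvDiffWitness_recursiveExhaustiveSearchAlgorithm.2.2.2) ∧ recursiveExhaustiveSearchAlgorithm (pvDiffWitness_recursiveExhaustiveSearchAlgorithm.1) (pvDiffWitness_recursiveExhaustiveSearchAlgorithm.2.1)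 (pvDiffWitness_recursiveExhaustiveSearchAlgorithm.2.2.1) (pvDiffWitness_recursiveExhaustiveSearchAlgorithm.2.2.2) = pvDiffWitnessOut_recursiveExhaustiveSearchAlgorithm.1 ∧ recursiveExhaustiveSearchAlgorithm_alt (pvDiffWitness_recursiveExhaustiveSearchAlgorithm.1) (pvDiffWitness_recursiveExhaustiveSearchAlgorithm.2.1) (pvDiffWitness_recursiveExhaustiveSearchAlgorithm.2.2.1) (pvDiffWitness_recursiveExhaustiveSearchAlgorithm.2.2.2) = pvDiffWitnessOut_recursiveExhaustiveSearchAlgorithm.2 ∧ pvDiffWitnessOut_recursiveExhaustiveSearchAlgorithm.1 ≠ pvDiffWitnessOut_recursiveExhaustiveSearchAlgorithm.2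
def Claim_exact_recursiveExhaustiveSearchAlgorithm : Prop := ∀ (A : List Int) (rightSide : Int) (index : Int) (subarr : List Int), Dom_recursiveExhaustiveSearchAlgorithm A rightSide index subarr → Pre_recursiveExhaustiveSearchAlgorithm A rightSide index subarr → D_recursiveExhaustiveSearchAlgorithm A rightSide index subarr → recursiveExhaustiveSearchAlgorithm A rightSide index subarr ≠ recursiveExhaustiveSearchAlgorithm_alt A rightSide index subarr

-- ===== LEMMAS AND PROOFS =====

-- the qualifying filter as an Option (some = candidate passes "nonempty and sum ≥ rightSide")
def pvToOpt (rightSide : Int) (xs : List Int) : Option (List Int) :=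
  if xs ≠ [] ∧ xs.sum ≥ rightSide then some xs else none

-- right-biased minimum by product (B's tie rule: later candidate wins ties)
def pvMerge (a b : Option (List Int)) : Option (List Int) :=
  match a, b with
  | none, b => b
  | some a, none => some a
  | some a, some b => if pvProdB b ≤ pvProdB a then some b else some a

-- subsets of E, exclude-before-include, earliest element most significant
def pvSubsets : List Int → List (List Int)
  | [] => [[]]
  | e :: r => pvSubsets r ++ (pvSubsets r).map (fun s => e :: s)

def pvElems (A : List Int) (index : Int) : List Int :=
  (PySem.List.pyRange index (A.length : Int) 1).map (fun j => (PySem.List.pyGet? A j).getD 0)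

-- A's recursion as a tournament over the list of remaining elements
def pvTourney (rightSide : Int) : List Int → List Int → List Int
  | [], sub => if sub.length ≠ 0 then sub else findOptimal [] [] rightSide
  | e :: r, sub => findOptimal (pvTourney rightSide r sub) (pvTourney rightSide r (sub ++ [e])) rightSide

lemma pvSum_eq (xs : List Int) : sumOfArray xs = xs.sum := by
  unfold sumOfArray
  simpa using PySem.List.foldl_add xs (fun x => x) 0

lemma pvUpd_eq_merge (rs : Int) (best : Option (List Int)) (c : List Int) :
    pvUpd rs best c = pvMerge best (pvToOpt rs c) := by
  by_cases hq : c ≠ [] ∧ c.sum ≥ rs <;>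
    cases best <;> simp [pvUpd, pvToOpt, pvMerge, hq]

lemma pvMerge_assoc (a b c : Option (List Int)) :
    pvMerge (pvMerge a b) c = pvMerge a (pvMerge b c) := by
  rcases a with _ | a
  · rfl
  · rcases b with _ | b
    · rfl
    · rcases c with _ | c
      · simp only [pvMerge]
        by_cases h1 : pvProdB b ≤ pvProdB a <;> simp [h1]
      · simp only [pvMerge]
        by_cases h1 : pvProdB b ≤ pvProdB a <;> by_cases h2 : pvProdB c ≤ pvProdB b <;>
          simp [h1, h2] <;> intros <;> omega

lemma pvFoldl_upd (rs : Int) (cs : List (List Int)) (acc : Option (List Int)) :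
    cs.foldl (pvUpd rs) acc = pvMerge acc (cs.foldl (pvUpd rs) none) := by
  induction cs generalizing acc with
  | nil => cases acc <;> rfl
  | cons c cs ih =>
      simp only [List.foldl_cons]
      rw [ih (pvUpd rs acc c), ih (pvUpd rs none c), pvUpd_eq_merge, pvUpd_eq_merge,
        pvMerge_assoc]
      rfl

lemma pvFindOptimal_toOpt (o1 o2 : List Int) (rs : Int) :
    pvToOpt rs (findOptimal o1 o2 rs) = pvMerge (pvToOpt rs o1) (pvToOpt rs o2) := by
  have hm : multiplicationOfItems = pvProdB := rfl
  rcases o1 with _ | ⟨x, o1⟩ <;> rcases o2 with _ | ⟨y, o2⟩ <;>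
    simp only [findOptimal, pvToOpt, pvMerge, pvSum_eq, hm] <;>
    split_ifs <;> simp_all <;> omega

lemma pvFindOptimal_shape (o1 o2 : List Int) (rs : Int) :
    findOptimal o1 o2 rs = [] ∨ (findOptimal o1 o2 rs ≠ [] ∧ (findOptimal o1 o2 rs).sum ≥ rs) := by
  rcases o1 with _ | ⟨x, o1⟩ <;> rcases o2 with _ | ⟨y, o2⟩ <;>
    simp only [findOptimal, pvSum_eq] <;> split_ifs <;> simp_all

lemma pvTourney_sel (rs : Int) (E : List Int) (sub : List Int) :
    pvToOpt rs (pvTourney rs E sub) =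
      ((pvSubsets E).map (fun s => sub ++ s)).foldl (pvUpd rs) none := by
  induction E generalizing sub with
  | nil =>
      have hfo : findOptimal [] [] rs = [] := by simp [findOptimal]
      rcases sub with _ | ⟨x, sub⟩ <;>
        simp [pvTourney, pvSubsets, hfo, pvUpd_eq_merge, pvMerge, pvToOpt]
  | cons e r ih =>
      have hc : ((pvSubsets (e :: r)).map (fun s => sub ++ s)) =
          (pvSubsets r).map (fun s => sub ++ s) ++
            (pvSubsets r).map (fun s => (sub ++ [e]) ++ s) := by
        simp only [pvSubsets, List.map_append, List.map_map]
        congr 1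
        apply List.map_congr_left
        intro s _
        simp
      simp only [pvTourney]
      rw [pvFindOptimal_toOpt, ih, ih, hc, List.foldl_append]
      exact (pvFoldl_upd rs _ _).symm

lemma pvSubsets_foldl (E : List Int) :
    E.reverse.foldl (fun acc x => acc ++ acc.map (fun s => x :: s)) [([] : List Int)] = pvSubsets E := by
  induction E with
  | nil => rfl
  | cons e r ih => rw [List.reverse_cons, List.foldl_append, ih]; rfl

lemma pvElems_cons (A : List Int) (index : Int) (h : index < (A.length : Int)) :
    pvElems A index = (PySem.List.pyGet? A index).getD 0 :: pvElems A (index + 1) := by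
  unfold pvElems
  rw [PySem.List.pyRange_one_cons h, List.map_cons]

lemma pvElems_nil (A : List Int) : pvElems A (A.length : Int) = [] := by
  simp [pvElems]

lemma pvGoA_eq_tourney (A : List Int) (rs : Int) (fuel : Nat) (index : Int) (sub : List Int)
    (hle : index ≤ (A.length : Int)) (hf : fuel = ((A.length : Int) - index).toNat) :
    pvGoA A rs fuel index sub = pvTourney rs (pvElems A index) sub := by
  induction fuel generalizing index sub with
  | zero =>
      have hidx : index = (A.length : Int) := by omega
      subst hidx
      rw [pvElems_nil]
      simp [pvGoA, pvTourney]
  | succ f ih =>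
      have hidx : index ≠ (A.length : Int) := by intro h; rw [h] at hf; omega
      have hlt : index < (A.length : Int) := lt_of_le_of_ne hle hidx
      rw [pvElems_cons A index hlt]
      simp only [pvGoA, if_neg hidx, pvTourney]
      rw [ih (index + 1) sub (by omega) (by omega),
        ih (index + 1) (sub ++ [(PySem.List.pyGet? A index).getD 0]) (by omega) (by omega)]

lemma pvAlt_eq (A : List Int) (rs index : Int) (sub : List Int) :
    recursiveExhaustiveSearchAlgorithm_alt A rs index sub =
      (pvToOpt rs (pvTourney rs (pvElems A index) sub)).getD [] := by
  show (((pvElems A index).reverse.foldl (fun acc x => acc ++ acc.map (fun s => x :: s))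
      [([] : List Int)]).foldl (fun best s => pvUpd rs best (sub ++ s)) none).getD [] = _
  rw [pvSubsets_foldl, ← List.foldl_map (f := fun s => sub ++ s) (g := pvUpd rs),
    ← pvTourney_sel]

-- ===== VERDICT (by name: the statement is the Claim_ definition above) =====
theorem recursiveExhaustiveSearchAlgorithm_spec : Claim_unchanged_recursiveExhaustiveSearchAlgorithm := by
  intro A rs index sub _hdom hpre hnd
  unfold recursiveExhaustiveSearchAlgorithm
  rw [pvGoA_eq_tourney A rs _ index sub hpre.2 rfl, pvAlt_eq]
  by_cases hq : pvTourney rs (pvElems A index) sub ≠ [] ∧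
      (pvTourney rs (pvElems A index) sub).sum ≥ rs
  · rw [pvToOpt, if_pos hq]; rfl
  · suffices h : pvTourney rs (pvElems A index) sub = [] by
      rw [h]; rw [pvToOpt]; simp
    by_cases hidx : index = (A.length : Int)
    · subst hidx
      rw [pvElems_nil] at hq ⊢
      rcases sub with _ | ⟨x, sub⟩
      · simp [pvTourney, findOptimal]
      · have hsum : rs ≤ (x :: sub).sum := by
          rcases not_and_or.mp (fun hD => hnd hD) with h1 | h2
          · exact absurd rfl h1
          · rcases not_and_or.mp h2 with h3 | h4
            · exact absurd (by simp) h3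
            · omega
        exact absurd ⟨by simp [pvTourney], by simpa [pvTourney] using hsum⟩ hq
    · have hlt : index < (A.length : Int) := lt_of_le_of_ne hpre.2 hidx
      rw [pvElems_cons A index hlt] at hq ⊢
      simp only [pvTourney] at hq ⊢
      rcases pvFindOptimal_shape (pvTourney rs (pvElems A (index + 1)) sub)
        (pvTourney rs (pvElems A (index + 1)) (sub ++ [(PySem.List.pyGet? A index).getD 0])) rs with
        h | h
      · exact h
      · exact absurd h hq

theorem recursiveExhaustiveSearchAlgorithm_changed : Claim_changed_recursiveExhaustiveSearchAlgorithm := by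
  unfold Claim_changed_recursiveExhaustiveSearchAlgorithm; decide

theorem recursiveExhaustiveSearchAlgorithm_tight : Claim_exact_recursiveExhaustiveSearchAlgorithm := by
  intro A rs index sub _hdom _hpre hD
  obtain ⟨hidx, hne, hsum⟩ := hD
  subst hidx
  have ha : recursiveExhaustiveSearchAlgorithm A rs (A.length : Int) sub = sub := by
    unfold recursiveExhaustiveSearchAlgorithm pvGoA
    simp [List.length_eq_zero_iff, hne]
  have hb : recursiveExhaustiveSearchAlgorithm_alt A rs (A.length : Int) sub = [] := by
    rw [pvAlt_eq, pvElems_nil]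
    have ht : pvTourney rs [] sub = sub := by
      simp [pvTourney, List.length_eq_zero_iff, hne]
    rw [ht, pvToOpt, if_neg (by omega)]
    rfl
  rw [ha, hb]
  exact hne
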